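-- pv_equiv track=rewrite | github.com/Codes-of-Hermit/LeetCode-Solutions | LeetCode/Best Reachable Tower.py | bestTower
-- ===== SOURCE A (Python) =====
-- def bestTower(towers, center, radius):
--     """
--     :type towers: List[List[int]]
--     :type center: List[int]
--     :type radius: int
--     :rtype: List[int]
--     """
--     cx, cy = center
--     max_quality = -1
--     best_coordinate = [-1, -1]
--
--     for x, y, q in towers:
--         # 1. Calculate Manhattan Distance
--         dist = abs(x - cx) + abs(y - cy)
--
--         # 2. Check Reachability
--         if dist <= radius:
--             # 3. Check if this tower is better than the previous best
--
--             # Priority 1: Higher Quality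
--             if q > max_quality:
--                 max_quality = q
--                 best_coordinate = [x, y]
--
--             # Priority 2: Same Quality, Lexicographically Smaller Coordinate
--             elif q == max_quality:
--                 # In Python, list/tuple comparison handles lexicographical order automatically
--                 # [x, y] < [best_x, best_y] checks x first, then y.
--                 if [x, y] < best_coordinate:
--                     best_coordinate = [x, y]
--
--     return best_coordinate
-- ===== SOURCE B (Python) =====
-- def bestTower(towers, center, radius):
--     """Sort-then-take-first: build the sort keys (-quality, x, y) of the
--     reachable towers, add the default answer [-1,-1] as a quality -1 key,
--     sort, and the first key is the answer."""
--     cx, cy = center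
--     keys = [(-q, x, y) for x, y, q in towers if abs(x - cx) + abs(y - cy) <= radius]
--     keys.append((1, -1, -1))
--     keys.sort()
--     _, x, y = keys[0]
--     return [x, y]
-- ===== Notes on version B (the rewrite author's own statement) =====
-- stated objective: alternative
-- what changed: Replaces A's fused accumulator loop (branching on quality and coordinate) by building the (-quality, x, y) sort keys of the reachable towers plus a quality -1 default key, sorting them, and returning the coordinates of the first key.
import Mathlib
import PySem

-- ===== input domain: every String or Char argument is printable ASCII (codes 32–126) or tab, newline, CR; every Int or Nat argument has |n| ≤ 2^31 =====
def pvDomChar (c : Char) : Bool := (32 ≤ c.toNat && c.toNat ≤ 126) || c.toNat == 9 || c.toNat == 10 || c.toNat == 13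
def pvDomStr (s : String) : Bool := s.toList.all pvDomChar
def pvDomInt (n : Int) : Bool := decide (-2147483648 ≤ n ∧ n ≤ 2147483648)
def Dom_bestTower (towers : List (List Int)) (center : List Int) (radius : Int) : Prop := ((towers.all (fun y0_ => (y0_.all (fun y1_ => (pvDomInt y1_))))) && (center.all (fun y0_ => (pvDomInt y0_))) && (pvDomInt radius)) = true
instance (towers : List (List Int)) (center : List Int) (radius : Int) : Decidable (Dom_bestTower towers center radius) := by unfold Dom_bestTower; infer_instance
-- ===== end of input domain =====

-- B replaces A's fused accumulator loop by sort-keys + sort + take first (alternative decomposition).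

-- ===== PORT A =====
-- state = (max_quality, best_x, best_y); best_coordinate is always the 2-list [best_x, best_y]
def bestTowerStep (cx cy radius : Int) (s : Int × Int × Int) (t : List Int) : Int × Int × Int :=
  match t with
  | [x, y, q] =>
    if |x - cx| + |y - cy| ≤ radius then
      if q > s.1 then (q, x, y)
      else if q = s.1 then
        -- [x, y] < best_coordinate, Python's lexicographic 2-list comparison
        (if x < s.2.1 ∨ (x = s.2.1 ∧ y < s.2.2) then (s.1, x, y) else s)
      else s
    else s
  | _ => s  -- a row that is not a 3-list makes Python raise; excluded by Pre_

def bestTower (towers : List (List Int)) (center : List Int) (radius : Int) : List Int :=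
  match center with
  | [cx, cy] =>
    let st := towers.foldl (bestTowerStep cx cy radius) (-1, -1, -1)
    [st.2.1, st.2.2]
  | _ => [-1, -1]  -- Python raises on center not of length 2; excluded by Pre_

-- ===== PORT B =====
-- non-strict lexicographic ≤ on the sort keys (the order `sort` uses)
def lexLe (a b : Int × Int × Int) : Bool :=
  a.1 < b.1 || (a.1 = b.1 && (a.2.1 < b.2.1 || (a.2.1 = b.2.1 && a.2.2 ≤ b.2.2)))

-- keys.sort() ported as the corresponding Lean library sort (stable, like Python's)
def bestTower_alt (towers : List (List Int)) (center : List Int) (radius : Int) : List Int :=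
  match center with
  | [cx, cy] =>
    let keys := towers.filterMap (fun t =>
      match t with
      | [x, y, q] => if |x - cx| + |y - cy| ≤ radius then some (-q, x, y) else none
      | _ => none)  -- a row that is not a 3-list makes Python raise; excluded by Pre_
    let keys := keys ++ [((1 : Int), (-1 : Int), (-1 : Int))]
    match keys.mergeSort lexLe with
    | k :: _ => [k.2.1, k.2.2]
    | [] => [-1, -1]  -- unreachable: keys is nonempty
  | _ => [-1, -1]

-- ===== PRECONDITION & SPEC =====
-- Pre_ excludes exactly the shapes on which Python raises (ValueError while unpacking):
-- center must have exactly 2 elements and every tower row exactly 3.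
def Pre_bestTower (towers : List (List Int)) (center : List Int) (radius : Int) : Prop :=
  center.length = 2 ∧ ∀ t ∈ towers, t.length = 3
instance (towers : List (List Int)) (center : List Int) (radius : Int) : Decidable (Pre_bestTower towers center radius) := by unfold Pre_bestTower; infer_instance
def pvWitness_bestTower : List (List Int) × List Int × Int := ([[0, 0, 5], [1, 2, 5]], [0, 1], 3)

def Spec_bestTower (towers : List (List Int)) (center : List Int) (radius : Int) (out : List Int) : Prop := out = bestTower_alt towers center radius
instance (towers : List (List Int)) (center : List Int) (radius : Int) (out : List Int) : Decidable (Spec_bestTower towers center radius out) := by unfold Spec_bestTower; infer_instance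

-- ===== CLAIM (what is proved, stated in full; the proofs are below) =====
def Claim_equal_bestTower : Prop := ∀ (towers : List (List Int)) (center : List Int) (radius : Int), Dom_bestTower towers center radius → Pre_bestTower towers center radius → Spec_bestTower towers center radius (bestTower towers center radius)

-- ===== LEMMAS AND PROOFS =====

-- abbreviations used only by the proofs
-- strict lexicographic < on the sort keys (Python tuple <)
def keyLt (a b : Int × Int × Int) : Bool :=
  a.1 < b.1 || (a.1 = b.1 && (a.2.1 < b.2.1 || (a.2.1 = b.2.1 && a.2.2 < b.2.2)))
def negKey (c : Int × Int × Int) : Int × Int × Int := (-c.1, c.2.1, c.2.2)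
def candMin (m c : Int × Int × Int) : Int × Int × Int :=
  if keyLt (negKey c) (negKey m) then c else m
def lexMin (m k : Int × Int × Int) : Int × Int × Int := if keyLt k m then k else m

theorem lexLe_refl (a : Int × Int × Int) : lexLe a a = true := by
  obtain ⟨x, y, z⟩ := a; simp [lexLe]

theorem lexLe_trans (a b c : Int × Int × Int) :
    lexLe a b = true → lexLe b c = true → lexLe a c = true := by
  obtain ⟨x1, y1, z1⟩ := a; obtain ⟨x2, y2, z2⟩ := b; obtain ⟨x3, y3, z3⟩ := c
  simp [lexLe]; omega

theorem lexLe_total (a b : Int × Int × Int) : (lexLe a b || lexLe b a) = true := by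
  obtain ⟨x1, y1, z1⟩ := a; obtain ⟨x2, y2, z2⟩ := b
  simp [lexLe]; omega

theorem lexLe_antisymm (a b : Int × Int × Int) :
    lexLe a b = true → lexLe b a = true → a = b := by
  obtain ⟨x1, y1, z1⟩ := a; obtain ⟨x2, y2, z2⟩ := b
  simp [lexLe]; omega

theorem keyLt_le (a b : Int × Int × Int) (h : keyLt a b = true) : lexLe a b = true := by
  obtain ⟨x1, y1, z1⟩ := a; obtain ⟨x2, y2, z2⟩ := b
  simp [keyLt] at h; simp [lexLe]; omega

theorem not_keyLt_le (a b : Int × Int × Int) (h : keyLt a b = false) : lexLe b a = true := by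
  obtain ⟨x1, y1, z1⟩ := a; obtain ⟨x2, y2, z2⟩ := b
  simp [keyLt] at h; simp [lexLe]; omega

theorem lexMin_le_left (w a : Int × Int × Int) : lexLe (lexMin w a) w = true := by
  unfold lexMin
  cases h : keyLt a w
  · simp [lexLe_refl]
  · simp [keyLt_le a w h]

theorem lexMin_le_right (w a : Int × Int × Int) : lexLe (lexMin w a) a = true := by
  unfold lexMin
  cases h : keyLt a w
  · simp [not_keyLt_le a w h]
  · simp [lexLe_refl]

theorem minFold_mem (l : List (Int × Int × Int)) (w : Int × Int × Int) :
    l.foldl lexMin w ∈ w :: l := by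
  induction l generalizing w with
  | nil => simp
  | cons a l ih =>
    rw [List.foldl_cons]
    have := ih (lexMin w a)
    have hm : lexMin w a ∈ ([w, a] : List _) := by
      unfold lexMin; split <;> simp
    rcases List.mem_cons.1 this with h | h
    · rw [h]; rcases List.mem_cons.1 hm with h' | h' <;> simp_all
    · simp [h]

theorem minFold_le (l : List (Int × Int × Int)) (w : Int × Int × Int) :
    ∀ x ∈ w :: l, lexLe (l.foldl lexMin w) x = true := by
  induction l generalizing w with
  | nil => intro x hx; simp at hx; simp [hx, lexLe_refl]
  | cons a l ih =>
    intro x hx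
    rw [List.foldl_cons]
    have hle : lexLe (l.foldl lexMin (lexMin w a)) (lexMin w a) = true :=
      ih (lexMin w a) _ (List.mem_cons_self ..)
    rcases List.mem_cons.1 hx with h | h
    · rw [h]; exact lexLe_trans _ _ _ hle (lexMin_le_left w a)
    · rcases List.mem_cons.1 h with h' | h'
      · rw [h']; exact lexLe_trans _ _ _ hle (lexMin_le_right w a)
      · exact ih (lexMin w a) _ (List.mem_cons_of_mem _ h')

-- the head of the sorted key list is exactly the left-fold minimum
theorem mergeSort_head (l : List (Int × Int × Int)) (w : Int × Int × Int) :
    ((l ++ [w]).mergeSort lexLe).head? = some (l.foldl lexMin w) := by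
  have hperm := List.mergeSort_perm (l ++ [w]) lexLe
  have hpw : List.Pairwise (fun a b => lexLe a b = true) ((l ++ [w]).mergeSort lexLe) :=
    List.pairwise_mergeSort lexLe_trans lexLe_total (l ++ [w])
  cases hs : (l ++ [w]).mergeSort lexLe with
  | nil =>
    have := hperm.length_eq
    rw [hs] at this; simp at this
  | cons h t =>
    rw [hs] at hperm hpw
    have hmemL : h ∈ l ++ [w] := hperm.mem_iff.1 (by simp)
    have hmem : h ∈ w :: l := by
      rcases List.mem_append.1 hmemL with h' | h' <;> simp_all
    have hhle : ∀ x ∈ l ++ [w], lexLe h x = true := by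
      intro x hx
      have : x ∈ h :: t := hperm.mem_iff.2 hx
      rcases List.mem_cons.1 this with h' | h'
      · rw [h']; exact lexLe_refl h
      · exact (List.pairwise_cons.1 hpw).1 x h'
    set m := l.foldl lexMin w with hm
    have hmmem : m ∈ l ++ [w] := by
      have := minFold_mem l w
      rcases List.mem_cons.1 this with h' | h' <;> simp_all
    have h1 : lexLe h m = true := hhle m hmmem
    have h2 : lexLe m h = true := minFold_le l w h hmem
    simp [lexLe_antisymm h m h1 h2]

-- A's fold over the rows equals the min-fold over the filtered candidates, from any state.
theorem fold_agree (cx cy radius : Int) (ts : List (List Int)) (s : Int × Int × Int) :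
    ts.foldl (bestTowerStep cx cy radius) s
      = (ts.filterMap (fun t =>
          match t with
          | [x, y, q] => if |x - cx| + |y - cy| ≤ radius then some (q, x, y) else none
          | _ => none)).foldl candMin s := by
  induction ts generalizing s with
  | nil => rfl
  | cons t ts ih =>
    rw [List.foldl_cons, List.filterMap_cons]
    match t with
    | [] => exact ih _
    | [_] => exact ih _
    | [_, _] => exact ih _
    | _ :: _ :: _ :: _ :: _ => exact ih _
    | [x, y, q] =>
      have hstep : bestTowerStep cx cy radius s [x, y, q]
          = (if |x - cx| + |y - cy| ≤ radius then candMin s (q, x, y) else s) := by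
        simp only [bestTowerStep, candMin, keyLt, negKey]
        by_cases hr : |x - cx| + |y - cy| ≤ radius
        · simp only [hr, if_pos]
          obtain ⟨a, b, c⟩ := s
          by_cases h1 : q > a
          · simp [h1, show -q < -a by omega]
          · by_cases h2 : q = a
            · subst h2
              by_cases h3 : x < b ∨ (x = b ∧ y < c) <;> simp_all
            · have : ¬ (-q < -a) := by omega
              simp [h1, h2, this, show ¬ (-q = -a) by omega]
        · simp [hr]
      by_cases hr : |x - cx| + |y - cy| ≤ radius
      · simp only [hr, if_pos, List.foldl_cons]
        rw [hstep]
        simp only [hr, if_pos]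
        exact ih _
      · rw [hstep]
        simp only [hr, if_neg, not_false_iff]
        exact ih _

theorem negKey_negKey (c : Int × Int × Int) : negKey (negKey c) = c := by
  obtain ⟨a, b, d⟩ := c; simp [negKey]

-- the candidate fold is the key-space min-fold, read back through negKey
theorem candFold_negKey (cs : List (Int × Int × Int)) (s : Int × Int × Int) :
    cs.foldl candMin s = negKey ((cs.map negKey).foldl lexMin (negKey s)) := by
  induction cs generalizing s with
  | nil => simp [negKey_negKey]
  | cons c cs ih =>
    rw [List.foldl_cons, List.map_cons, List.foldl_cons]
    have : negKey (candMin s c) = lexMin (negKey s) (negKey c) := by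
      unfold candMin lexMin; split <;> simp_all
    rw [ih (candMin s c), this]

-- B's key list is the candidate list mapped through negKey
theorem keys_eq_map (cx cy radius : Int) (ts : List (List Int)) :
    ts.filterMap (fun t =>
      match t with
      | [x, y, q] => if |x - cx| + |y - cy| ≤ radius then some (-q, x, y) else none
      | _ => none)
    = (ts.filterMap (fun t =>
        match t with
        | [x, y, q] => if |x - cx| + |y - cy| ≤ radius then some (q, x, y) else none
        | _ => none)).map negKey := by
  induction ts with
  | nil => rfl
  | cons t ts ih =>
    rw [List.filterMap_cons, List.filterMap_cons]
    match t with
    | [] => exact ih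
    | [_] => exact ih
    | [_, _] => exact ih
    | _ :: _ :: _ :: _ :: _ => exact ih
    | [x, y, q] =>
      by_cases hr : |x - cx| + |y - cy| ≤ radius
      · simp only [hr, if_pos, List.map_cons, negKey]
        rw [ih]
      · simp only [hr, if_neg, not_false_iff]
        exact ih

-- ===== VERDICT (by name: the statement is the Claim_ definition above) =====
theorem bestTower_spec : Claim_equal_bestTower := by
  intro towers center radius _hdom hpre
  unfold Spec_bestTower bestTower bestTower_alt
  match center, hpre.1 with
  | [cx, cy], _ =>
    simp only
    rw [fold_agree, candFold_negKey, ← keys_eq_map]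
    set keys := towers.filterMap (fun t =>
      match t with
      | [x, y, q] => if |x - cx| + |y - cy| ≤ radius then some (-q, x, y) else none
      | _ => none) with hk
    have hhead := mergeSort_head keys ((1 : Int), (-1 : Int), (-1 : Int))
    cases hs : (keys ++ [((1 : Int), (-1 : Int), (-1 : Int))]).mergeSort lexLe with
    | nil => rw [hs] at hhead; simp at hhead
    | cons k t =>
      rw [hs] at hhead
      simp only [List.head?_cons, Option.some.injEq] at hhead
      have : negKey ((-1 : Int), (-1 : Int), (-1 : Int)) = ((1 : Int), (-1 : Int), (-1 : Int)) := by
        simp [negKey]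
      rw [this, ← hhead, negKey]
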